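-- pv_equiv track=rewrite | github.com/ashiklom/advent-of-code | 2024/02/solve.py | try_again
-- ===== SOURCE A (Python) =====
-- def is_safe(num):
--     for i in range(len(num)-1):
--         diff = num[i+1] - num[i]
--         if not (1 <= abs(diff) <= 3):
--             return False
--         if i == 0:
--             desc = diff < 0
--         else:
--             if desc != (diff < 0):
--                 return False
--     return True
--
-- def try_again(line):
--     if is_safe(line):
--         return True
--     for i in range(len(line)):
--         l = line.copy()
--         l.pop(i)
--         safe = is_safe(l)
--         if safe:
--             return True
--     return False
-- ===== SOURCE B (Python) =====
-- def _bad(d0, d):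
--     return not (1 <= abs(d) <= 3) or (d < 0) != (d0 < 0)
--
-- def _first_bad(ds):
--     for k, d in enumerate(ds):
--         if _bad(ds[0], d):
--             return k
--     return None
--
-- def _ok(ds):
--     return not ds or all(not _bad(ds[0], d) for d in ds)
--
-- def _del_diffs(ds, i, n):
--     # diff sequence of the line with element i removed (0 <= i < n, n = len(line))
--     if i == 0:
--         return ds[1:]
--     if i == n - 1:
--         return ds[:-1]
--     return ds[:i - 1] + [ds[i - 1] + ds[i]] + ds[i + 1:]
--
-- def try_again(line):
--     ds = [b - a for a, b in zip(line, line[1:])]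
--     j = _first_bad(ds)
--     if j is None:
--         return True
--     # a removal can only help at the first bad pair, or by changing the leading diff
--     n = len(line)
--     return any(_ok(_del_diffs(ds, i, n)) for i in (0, 1, j, j + 1))
-- ===== Notes on version B (the rewrite author's own statement) =====
-- stated objective: faster
-- what changed: B builds the difference sequence once, scans it for the first violating pair, and tests only the four removal candidates 0, 1, j, j+1 (each via an O(1)-size merge of adjacent diffs) instead of A's re-scan of every one-element-removed copy of the list.
import Mathlib
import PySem

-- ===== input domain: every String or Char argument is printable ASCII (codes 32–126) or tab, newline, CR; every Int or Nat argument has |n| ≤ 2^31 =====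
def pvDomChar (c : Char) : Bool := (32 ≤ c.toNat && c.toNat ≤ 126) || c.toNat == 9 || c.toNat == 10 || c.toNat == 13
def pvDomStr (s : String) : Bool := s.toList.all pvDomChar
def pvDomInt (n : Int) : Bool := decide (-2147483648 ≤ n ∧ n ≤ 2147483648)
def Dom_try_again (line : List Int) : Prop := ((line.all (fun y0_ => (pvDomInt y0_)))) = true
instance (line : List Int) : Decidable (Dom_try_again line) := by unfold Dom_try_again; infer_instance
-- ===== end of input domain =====

-- B replaces A's try-every-removal re-scan by one scan of the difference sequence plus
-- at most four candidate removals (indices 0, 1, j, j+1 around the first violating pair).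

-- ===== PORT A =====
-- the 'for i in range(len(num)-1)' loop of is_safe, with its early returns; desc starts unset (false)
def isSafeGo (num : List Int) (i : Nat) (desc : Bool) : Bool :=
  if h : i + 1 < num.length then
    let diff := num[i + 1] - num[i]'(by omega)
    if !(decide (1 ≤ |diff|) && decide (|diff| ≤ 3)) then false
    else if i = 0 then isSafeGo num (i + 1) (decide (diff < 0))
    else if desc != decide (diff < 0) then false
    else isSafeGo num (i + 1) desc
  else true
termination_by num.length - i

def is_safe (num : List Int) : Bool := isSafeGo num 0 false

-- the 'for i in range(len(line))' loop of try_again; l.pop(i) via PySem.List.pop?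
def tryGo (line : List Int) (i : Nat) : Bool :=
  if i < line.length then
    match PySem.List.pop? line (i : Int) with
    | some (_, l) => if is_safe l then true else tryGo line (i + 1)
    | none => false
  else false
termination_by line.length - i

def try_again (line : List Int) : Bool :=
  if is_safe line then true else tryGo line 0

-- ===== PORT B =====
def badB (d0 d : Int) : Bool :=
  !(decide (1 ≤ |d|) && decide (|d| ≤ 3)) || (decide (d < 0) != decide (d0 < 0))

-- the enumerate loop of _first_bad
def firstBadGo (d0 : Int) : List Int → Nat → Option Nat
  | [], _ => none
  | d :: t, k => if badB d0 d then some k else firstBadGo d0 t (k + 1)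

def firstBad (ds : List Int) : Option Nat :=
  match ds with
  | [] => none
  | d0 :: _ => firstBadGo d0 ds 0

-- _ok: empty list is fine, otherwise all diffs good w.r.t. the first one
def okB : List Int → Bool
  | [] => true
  | d0 :: t => (d0 :: t).all (fun d => !badB d0 d)

-- _del_diffs: ds[1:] = tail, ds[:-1] = dropLast, ds[:i-1]/ds[i+1:] = take/drop, ds[k] = getD (indices valid)
def delDiffs (ds : List Int) (i n : Nat) : List Int :=
  if i = 0 then ds.tail
  else if i = n - 1 then ds.dropLast
  else ds.take (i - 1) ++ [ds.getD (i - 1) 0 + ds.getD i 0] ++ ds.drop (i + 1)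

-- [b - a for a, b in zip(line, line[1:])]
def dseq (line : List Int) : List Int := List.zipWith (fun a b => b - a) line line.tail

def try_again_alt (line : List Int) : Bool :=
  let ds := dseq line
  match firstBad ds with
  | none => true
  | some j => [0, 1, j, j + 1].any (fun i => okB (delDiffs ds i line.length))

-- ===== PRECONDITION & SPEC =====
def Spec_try_again (line : List Int) (out : Bool) : Prop := out = try_again_alt line
instance (line : List Int) (out : Bool) : Decidable (Spec_try_again line out) := by unfold Spec_try_again; infer_instance

-- ===== CLAIM (what is proved, stated in full; the proofs are below) =====
def Claim_equal_try_again : Prop := ∀ (line : List Int), Dom_try_again line → Spec_try_again line (try_again line)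

-- ===== LEMMAS AND PROOFS =====

theorem firstBadGo_none (d0 : Int) (t : List Int) : ∀ k, firstBadGo d0 t k = none ↔ t.all (fun d => !badB d0 d) = true := by
  induction t with
  | nil => simp [firstBadGo]
  | cons d t ih =>
    intro k
    by_cases h : badB d0 d = true
    · simp [firstBadGo, h]
    · simp only [Bool.not_eq_true] at h
      simp [firstBadGo, h, ih]

theorem firstBadGo_some (d0 : Int) (t : List Int) : ∀ k j, firstBadGo d0 t k = some j →
    ∃ m, ∃ hm : m < t.length, j = k + m ∧ badB d0 t[m] = true := by
  induction t with
  | nil => simp [firstBadGo]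
  | cons d t ih =>
    intro k j h
    by_cases hb : badB d0 d = true
    · simp [firstBadGo, hb] at h
      exact ⟨0, by simp, by omega, by simpa using hb⟩
    · simp only [Bool.not_eq_true] at hb
      simp [firstBadGo, hb] at h
      obtain ⟨m, hm, rfl, hbad⟩ := ih (k + 1) j h
      exact ⟨m + 1, by simpa using hm, by omega, by simpa using hbad⟩

theorem firstBad_none_iff (ds : List Int) : firstBad ds = none ↔ okB ds = true := by
  cases ds with
  | nil => simp [firstBad, okB]
  | cons d0 t => simpa [firstBad, okB] using firstBadGo_none d0 (d0 :: t) 0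

theorem firstBad_some (ds : List Int) (j : Nat) (h : firstBad ds = some j) :
    ∃ hj : j < ds.length, badB (ds[0]'(by omega)) ds[j] = true := by
  cases ds with
  | nil => simp [firstBad] at h
  | cons d0 t =>
    obtain ⟨m, hm, rfl, hbad⟩ := firstBadGo_some d0 (d0 :: t) 0 j h
    exact ⟨by simpa using hm, by simpa using hbad⟩

theorem dseq_length (l : List Int) : (dseq l).length = l.length - 1 := by simp [dseq]

theorem dseq_getElem (l : List Int) (k : Nat) (h : k < (dseq l).length) :
    (dseq l)[k] = l[k + 1]'(by have := dseq_length l; omega) - l[k]'(by have := dseq_length l; omega) := by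
  have hl := dseq_length l
  simp [dseq, List.getElem_zipWith, List.getElem_tail]

theorem okB_iff (ds : List Int) : okB ds = true ↔
    ∀ (m : Nat) (hm : m < ds.length), badB (ds[0]'(by omega)) ds[m] = false := by
  cases ds with
  | nil => simp [okB]
  | cons d0 t =>
    simp only [okB, List.all_eq_true]
    constructor
    · intro h m hm
      have := h (d0 :: t)[m] (by exact List.getElem_mem hm)
      simpa using this
    · intro h d hd
      obtain ⟨m, hm, rfl⟩ := List.mem_iff_getElem.mp hd
      simpa using h m hm

theorem not_badB (d0 d : Int) :
    (!badB d0 d) = ((decide (1 ≤ |d|) && decide (|d| ≤ 3)) && (decide (d0 < 0) == decide (d < 0))) := by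
  have h : ∀ a b c e : Bool, (!(!(a && b) || (c != e))) = ((a && b) && (e == c)) := by decide
  unfold badB
  exact h _ _ _ _

theorem isSafeGo_tail (num : List Int) (i : Nat) (desc : Bool) (hi : 1 ≤ i) :
    isSafeGo num i desc =
      ((dseq num).drop i).all
        (fun d => (decide (1 ≤ |d|) && decide (|d| ≤ 3)) && (desc == decide (d < 0))) := by
  have hl := dseq_length num
  by_cases h : i + 1 < num.length
  · rw [isSafeGo]
    simp only [h, dif_pos]
    have hdrop : (dseq num).drop i = (dseq num)[i]'(by omega) :: (dseq num).drop (i + 1) :=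
      List.drop_eq_getElem_cons (by omega)
    have hd : (dseq num)[i]'(by omega) = num[i + 1] - num[i]'(by omega) := dseq_getElem num i (by omega)
    rw [hdrop, List.all_cons, hd]
    have hne : ¬ i = 0 := by omega
    by_cases hmag : (decide (1 ≤ |num[i + 1] - num[i]'(by omega)|) && decide (|num[i + 1] - num[i]'(by omega)| ≤ 3)) = true
    · rw [hmag, if_neg (by simp), if_neg hne, Bool.true_and]
      by_cases hdesc : desc = decide (num[i + 1] - num[i]'(by omega) < 0)
      · rw [if_neg (by simp [hdesc]), isSafeGo_tail num (i + 1) desc (by omega),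
            show (desc == decide (num[i + 1] - num[i]'(by omega) < 0)) = true from beq_iff_eq.mpr hdesc,
            Bool.true_and]
      · rw [if_pos (bne_iff_ne.mpr hdesc),
            show (desc == decide (num[i + 1] - num[i]'(by omega) < 0)) = false from beq_eq_false_iff_ne.mpr hdesc,
            Bool.false_and]
    · simp only [Bool.not_eq_true] at hmag
      rw [hmag, Bool.not_false, if_pos rfl, Bool.false_and, Bool.false_and]
  · rw [isSafeGo, dif_neg h]
    have : (dseq num).drop i = [] := List.drop_eq_nil_iff.mpr (by omega)
    simp [this]
termination_by num.length - i

theorem is_safe_eq (num : List Int) : is_safe num = okB (dseq num) := by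
  have hl := dseq_length num
  rw [is_safe, isSafeGo]
  by_cases h : 0 + 1 < num.length
  · simp only [h, dif_pos]
    have h0 : (dseq num)[0]'(by omega) = num[0 + 1] - num[0]'(by omega) := dseq_getElem num 0 (by omega)
    have hds : dseq num = (dseq num)[0]'(by omega) :: (dseq num).drop 1 := by
      have := List.drop_eq_getElem_cons (l := dseq num) (i := 0) (by omega)
      simpa using this
    by_cases hmag : (decide ((1 : Int) ≤ |num[0 + 1] - num[0]'(by omega)|) && decide (|num[0 + 1] - num[0]'(by omega)| ≤ 3)) = true
    · rw [hmag, if_neg (by simp), if_pos trivial, isSafeGo_tail num 1 _ (by omega)]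
      conv_rhs => rw [hds]
      rw [okB, List.all_cons, not_badB, h0, hmag, beq_self_eq_true, Bool.and_true, Bool.true_and]
      simp only [not_badB]
    · simp only [Bool.not_eq_true] at hmag
      rw [hmag, Bool.not_false, if_pos rfl]
      conv_rhs => rw [hds]
      rw [okB, List.all_cons, not_badB, h0, hmag, Bool.false_and]
      exact (Bool.false_and _).symm
  · rw [dif_neg h]
    have : dseq num = [] := List.eq_nil_of_length_eq_zero (by omega)
    simp [this, okB]

theorem tryGo_iff (line : List Int) (i : Nat) :
    tryGo line i = true ↔ ∃ k, i ≤ k ∧ k < line.length ∧ is_safe (line.eraseIdx k) = true := by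
  rw [tryGo]
  by_cases h : i < line.length
  · rw [if_pos h, PySem.List.pop?_natCast line i h]
    by_cases hs : is_safe (line.eraseIdx i) = true
    · simp only [hs, if_pos trivial]
      constructor
      · intro _; exact ⟨i, le_refl i, h, hs⟩
      · intro _; trivial
    · simp only [hs]
      rw [if_neg (by simp)]
      rw [tryGo_iff line (i + 1)]
      constructor
      · rintro ⟨k, hk1, hk2, hk3⟩; exact ⟨k, by omega, hk2, hk3⟩
      · rintro ⟨k, hk1, hk2, hk3⟩
        refine ⟨k, ?_, hk2, hk3⟩
        rcases Nat.eq_or_lt_of_le hk1 with rfl | hlt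
        · exact absurd hk3 hs
        · omega
  · rw [if_neg h]
    simp only [Bool.false_eq_true, false_iff]
    rintro ⟨k, hk1, hk2, _⟩; omega
termination_by line.length - i

theorem okB_erase_false (l : List Int) (j : Nat) (hj : j < (dseq l).length)
    (hb : badB ((dseq l)[0]'(by omega)) ((dseq l)[j]) = true)
    (i : Nat) (hi : i < l.length) (h0 : i ≠ 0) (h1 : i ≠ 1) (hij : i ≠ j) (hij1 : i ≠ j + 1) :
    okB (dseq (l.eraseIdx i)) = false := by
  have hl := dseq_length l
  have hel : (l.eraseIdx i).length = l.length - 1 := by rw [List.length_eraseIdx]; simp [hi]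
  have hnl := dseq_length (l.eraseIdx i)
  have hn3 : 3 ≤ l.length := by omega
  have hd0 : (dseq (l.eraseIdx i))[0]'(by omega) = (dseq l)[0]'(by omega) := by
    rw [dseq_getElem _ _ (by omega), dseq_getElem _ _ (by omega)]
    simp only [List.getElem_eraseIdx]
    rw [dif_pos (by omega), dif_pos (by omega)]
  have hkey : ∃ m, ∃ hm : m < (dseq (l.eraseIdx i)).length,
      (dseq (l.eraseIdx i))[m] = (dseq l)[j] := by
    rcases Nat.lt_or_ge j i with hji | hji
    · -- j < i, and j ≠ i - 1 (from i ≠ j + 1), so j + 1 < i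
      have hj1 : j + 1 < i := by omega
      refine ⟨j, by omega, ?_⟩
      rw [dseq_getElem _ _ (by omega), dseq_getElem _ _ (by omega)]
      simp only [List.getElem_eraseIdx]
      rw [dif_pos (by omega), dif_pos (by omega)]
    · -- j > i
      have hji' : i + 1 ≤ j := by omega
      refine ⟨j - 1, by omega, ?_⟩
      rw [dseq_getElem _ _ (by omega), dseq_getElem _ _ (by omega)]
      simp only [List.getElem_eraseIdx]
      rw [dif_neg (by omega), dif_neg (by omega)]
      congr 2 <;> omega
  obtain ⟨m, hm, hdm⟩ := hkey
  by_contra hne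
  have hok : okB (dseq (l.eraseIdx i)) = true := by
    revert hne; cases okB (dseq (l.eraseIdx i)) <;> simp
  have hfalse := (okB_iff _).mp hok m hm
  rw [hd0, hdm] at hfalse
  rw [hfalse] at hb
  exact absurd hb (by simp)

theorem delDiffs_correct (l : List Int) (i : Nat) (hi : i < l.length) (hn : 2 ≤ l.length) :
    delDiffs (dseq l) i l.length = dseq (l.eraseIdx i) := by
  have hl := dseq_length l
  have hel : (l.eraseIdx i).length = l.length - 1 := by rw [List.length_eraseIdx]; simp [hi]
  have hnl := dseq_length (l.eraseIdx i)
  apply List.ext_getElem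
  · unfold delDiffs
    split_ifs <;> simp [hl, hnl, hel] <;> omega
  · intro k hk1 hk2
    rw [dseq_getElem _ _ hk2]
    simp only [List.getElem_eraseIdx]
    unfold delDiffs at hk1 ⊢
    split_ifs at hk1 ⊢ with hi0 hin
    · subst hi0
      rw [List.getElem_tail, dseq_getElem _ _ (by omega),
          dif_neg (by omega), dif_neg (by omega)]
    · rw [List.getElem_dropLast, dseq_getElem _ _ (by omega),
          dif_pos (by omega), dif_pos (by omega)]
    · have hlen_take : (List.take (i - 1) (dseq l)).length = i - 1 := by
        simp [hl]; omega
      have hXY : (List.take (i - 1) (dseq l) ++ [(dseq l).getD (i - 1) 0 + (dseq l).getD i 0]).length = i := by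
        simp [hlen_take]; omega
      have hvv : (dseq l).getD (i - 1) 0 + (dseq l).getD i 0 = l[i + 1]'(by omega) - l[i - 1]'(by omega) := by
        rw [List.getD_eq_getElem _ _ (by omega), List.getD_eq_getElem _ _ (by omega),
            dseq_getElem _ _ (by omega), dseq_getElem _ _ (by omega)]
        have h1 : l[i - 1 + 1]'(by omega) = l[i]'(by omega) := by congr 1 <;> omega
        rw [h1]; ring
      rcases lt_trichotomy k (i - 1) with hk | hk | hk
      · rw [List.getElem_append_left (by rw [hXY]; omega),
            List.getElem_append_left (by rw [hlen_take]; omega),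
            List.getElem_take, dseq_getElem _ _ (by omega),
            dif_pos (by omega), dif_pos (by omega)]
      · rw [List.getElem_append_left (by rw [hXY]; omega),
            List.getElem_append_right (by rw [hlen_take]; omega)]
        have h0 : ([(dseq l).getD (i - 1) 0 + (dseq l).getD i 0])[k - (List.take (i - 1) (dseq l)).length]'(by rw [hlen_take]; simp; omega) = (dseq l).getD (i - 1) 0 + (dseq l).getD i 0 := by
          have h00 : k - (List.take (i - 1) (dseq l)).length = 0 := by rw [hlen_take]; omega
          simp [h00]
        rw [h0, hvv, dif_neg (by omega), dif_pos (by omega)]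
        have h2 : l[k + 1 + 1]'(by omega) = l[i + 1]'(by omega) := by congr 1 <;> omega
        have h3 : l[k]'(by omega) = l[i - 1]'(by omega) := by congr 1 <;> omega
        rw [h2, h3]
      · rw [List.getElem_append_right (by rw [hXY]; omega)]
        have h4 : (List.drop (i + 1) (dseq l))[k - (List.take (i - 1) (dseq l) ++ [(dseq l).getD (i - 1) 0 + (dseq l).getD i 0]).length]'(by rw [hXY]; simp [hl]; omega) = (dseq l)[k + 1]'(by omega) := by
          rw [List.getElem_drop]; congr 1; rw [hXY]; omega
        rw [h4, dseq_getElem _ _ (by omega), dif_neg (by omega), dif_neg (by omega)]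

-- ===== VERDICT (by name: the statement is the Claim_ definition above) =====
theorem try_again_spec : Claim_equal_try_again := by
  intro line _
  unfold Spec_try_again
  have hl := dseq_length line
  cases hfb : firstBad (dseq line) with
  | none =>
    have hok : okB (dseq line) = true := (firstBad_none_iff _).mp hfb
    rw [try_again, is_safe_eq, hok, if_pos rfl]
    simp [try_again_alt, hfb]
  | some j =>
    have hokf : okB (dseq line) = false := by
      cases h : okB (dseq line)
      · rfl
      · exact absurd ((firstBad_none_iff _).mpr h) (by simp [hfb])
    obtain ⟨hj, hbad⟩ := firstBad_some _ _ hfb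
    have hn2 : 2 ≤ line.length := by omega
    rw [try_again, is_safe_eq, hokf, if_neg (by simp)]
    have halt : try_again_alt line
        = [0, 1, j, j + 1].any (fun i => okB (delDiffs (dseq line) i line.length)) := by
      simp [try_again_alt, hfb]
    rw [halt, Bool.eq_iff_iff, tryGo_iff, List.any_eq_true]
    constructor
    · rintro ⟨k, -, hk, hsafe⟩
      rw [is_safe_eq] at hsafe
      by_cases hc : k = 0 ∨ k = 1 ∨ k = j ∨ k = j + 1
      · refine ⟨k, by rcases hc with rfl | rfl | rfl | rfl <;> simp, ?_⟩
        rw [delDiffs_correct line k hk hn2]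
        exact hsafe
      · push_neg at hc
        have := okB_erase_false line j hj hbad k hk hc.1 hc.2.1 hc.2.2.1 hc.2.2.2
        rw [this] at hsafe
        exact absurd hsafe (by simp)
    · rintro ⟨i, hmem, hoki⟩
      have hi : i < line.length := by
        simp only [List.mem_cons, List.not_mem_nil, or_false] at hmem
        rcases hmem with rfl | rfl | rfl | rfl <;> omega
      refine ⟨i, Nat.zero_le i, hi, ?_⟩
      rw [is_safe_eq, ← delDiffs_correct line i hi hn2]
      exact hoki
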